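-- pv_equiv track=rewrite | github.com/Heavybullets8/qcad-python-scripts | functions.py | auto_holes_func
-- ===== SOURCE A (Python) =====
-- def auto_holes_func(lengths):
--     hole_count = []
--     for length in lengths:
--         if length < 108:
--             holes = 2
--         elif length < 168:
--             holes = 3
--         elif length < 216:
--             holes = 4
--         elif length < 230:
--             holes = 5
--         else:
--             holes = 6
--         hole_count.append(holes)
--     return hole_count
-- ===== SOURCE B (Python) =====
-- # Table-driven: binary search (bisect_right, hand-written since A imports nothing)
-- # into a threshold table instead of an if/elif cascade.
--
-- _THRESHOLDS = [108, 168, 216, 230]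
--
--
-- def _bisect_right(a, x):
--     lo, hi = 0, len(a)
--     while lo < hi:
--         mid = (lo + hi) // 2
--         if x < a[mid]:
--             hi = mid
--         else:
--             lo = mid + 1
--     return lo
--
--
-- def auto_holes_func(lengths):
--     return [2 + _bisect_right(_THRESHOLDS, length) for length in lengths]
-- ===== Notes on version B (the rewrite author's own statement) =====
-- stated objective: idiomatic
-- what changed: Replaces the if/elif cascade with a precomputed threshold table and a bisect_right-style binary search, so the hole count is 2 + the insertion index.
import Mathlib
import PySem

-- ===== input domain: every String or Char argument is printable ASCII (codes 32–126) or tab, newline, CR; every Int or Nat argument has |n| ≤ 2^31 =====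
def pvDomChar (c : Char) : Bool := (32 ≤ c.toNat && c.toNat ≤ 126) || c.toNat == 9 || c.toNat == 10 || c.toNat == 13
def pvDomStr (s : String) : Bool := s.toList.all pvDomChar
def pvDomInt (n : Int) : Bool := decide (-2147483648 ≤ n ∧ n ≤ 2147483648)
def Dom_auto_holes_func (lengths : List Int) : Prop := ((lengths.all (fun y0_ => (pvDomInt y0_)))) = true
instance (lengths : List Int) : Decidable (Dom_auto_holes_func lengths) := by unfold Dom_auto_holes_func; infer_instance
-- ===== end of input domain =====

-- B maps each length through a threshold table with a hand-written bisect_right binary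
-- search instead of A's if/elif cascade; same values, idiomatic table-driven shape.
-- ===== PORT A =====
def auto_holes_func (lengths : List Int) : List Int :=
  lengths.foldl (fun hole_count length =>
    hole_count ++ [if length < 108 then 2
      else if length < 168 then 3
      else if length < 216 then 4
      else if length < 230 then 5
      else 6]) []

-- ===== PORT B =====
-- hand-written while-loop bisect_right from Source B (list index is in range on every call)
-- structural transcription of Source B's while-loop body; fuel = hi - lo bounds the
-- iteration count (each step shrinks hi - lo)
def pvBisectRightGo (a : List Int) (x : Int) (lo hi : Nat) : Nat → Nat
  | 0 => lo
  | fuel + 1 =>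
    if lo < hi then
      if x < a.getD ((lo + hi) / 2) 0 then pvBisectRightGo a x lo ((lo + hi) / 2) fuel
      else pvBisectRightGo a x ((lo + hi) / 2 + 1) hi fuel
    else lo

def pvBisectRight (a : List Int) (x : Int) (lo hi : Nat) : Nat :=
  pvBisectRightGo a x lo hi (hi - lo)

def pvThresholds : List Int := [108, 168, 216, 230]

def auto_holes_func_alt (lengths : List Int) : List Int :=
  lengths.map (fun length => 2 + (pvBisectRight pvThresholds length 0 pvThresholds.length : Int))

-- ===== PRECONDITION & SPEC =====
def Spec_auto_holes_func (lengths : List Int) (out : List Int) : Prop := out = auto_holes_func_alt lengths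
instance (lengths : List Int) (out : List Int) : Decidable (Spec_auto_holes_func lengths out) := by unfold Spec_auto_holes_func; infer_instance

-- ===== CLAIM (what is proved, stated in full; the proofs are below) =====
def Claim_equal_auto_holes_func : Prop := ∀ (lengths : List Int), Dom_auto_holes_func lengths → Spec_auto_holes_func lengths (auto_holes_func lengths)

-- ===== LEMMAS AND PROOFS =====

-- ===== VERDICT (by name: the statement is the Claim_ definition above) =====
lemma pv_elem (length : Int) :
    (if length < 108 then (2:Int)
      else if length < 168 then 3
      else if length < 216 then 4
      else if length < 230 then 5
      else 6)
    = 2 + (pvBisectRight pvThresholds length 0 pvThresholds.length : Int) := by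
  simp only [pvThresholds, List.length]
  by_cases h1 : length < 108 <;> by_cases h2 : length < 168 <;>
    by_cases h3 : length < 216 <;> by_cases h4 : length < 230 <;>
    simp [pvBisectRight, pvBisectRightGo, h1, h2, h3, h4, List.getD] <;> omega

theorem auto_holes_func_spec : Claim_equal_auto_holes_func := by
  intro lengths _
  unfold Spec_auto_holes_func auto_holes_func auto_holes_func_alt
  rw [PySem.List.foldl_append_singleton_eq_map]
  exact List.map_congr_left fun x _ => pv_elem x
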